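-- pv_equiv track=rewrite | github.com/abhishekmuhuri/puppy_username_checker | main.py | check_upper_lower
-- ===== SOURCE A (Python) =====
-- def check_upper_lower(username: str) -> dict:
--     result = {"capital": False, "small": False, "number": False}
--     letters = list(username)
--     if letters[-1].isnumeric():
--         result['number'] = True
--     for letter in letters:
--         if ord('A') <= ord(letter) <= ord('Z'):
--             result['capital'] = True
--         if ord('a') <= ord(letter) <= ord('z'):
--             result['small'] = True
--         if result['capital'] and result['small']:
--             return result
--     return result
-- ===== SOURCE B (Python) =====
-- def check_upper_lower(username: str) -> dict:
--     number = username[-1].isnumeric()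
--     chars = set(username)
--     capital = any(chr(c) in chars for c in range(ord('A'), ord('Z') + 1))
--     small = any(chr(c) in chars for c in range(ord('a'), ord('z') + 1))
--     return {"capital": capital, "small": small, "number": number}
-- ===== Notes on version B (the rewrite author's own statement) =====
-- stated objective: alternative
-- what changed: Inverts the traversal: instead of scanning the username's characters against code-point ranges with an early-exit loop, B hashes the username's characters into a set once and then probes that set with the 26 letters of each alphabet (membership tests over the alphabet, not range tests over the input).
import Mathlib
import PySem

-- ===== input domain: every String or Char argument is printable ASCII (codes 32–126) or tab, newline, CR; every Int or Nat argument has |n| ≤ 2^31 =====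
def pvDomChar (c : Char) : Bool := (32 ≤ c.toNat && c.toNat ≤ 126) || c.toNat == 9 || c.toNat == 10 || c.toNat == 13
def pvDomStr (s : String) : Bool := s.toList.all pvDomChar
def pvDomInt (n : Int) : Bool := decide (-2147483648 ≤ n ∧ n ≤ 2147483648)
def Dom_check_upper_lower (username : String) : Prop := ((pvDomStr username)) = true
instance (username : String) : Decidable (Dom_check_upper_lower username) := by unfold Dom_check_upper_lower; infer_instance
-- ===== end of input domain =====

-- B inverts the traversal: it builds a set of the username's characters once and probes it with the
-- 26 letters of each alphabet, instead of A's early-exit range scan over the username's characters.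
-- A raises IndexError on the empty string (letters[-1]); so does B (username[-1]); Pre_ excludes it.

-- ===== PORT A =====
-- A's early-exit loop over the letters, carrying the dict's three values as state.
def pvLoopA : List Char → Bool → Bool → Bool → List (String × Bool)
  | [], cap, sm, num => [("capital", cap), ("small", sm), ("number", num)]
  | letter :: rest, cap, sm, num =>
    let cap' := if 'A'.toNat ≤ letter.toNat ∧ letter.toNat ≤ 'Z'.toNat then true else cap
    let sm' := if 'a'.toNat ≤ letter.toNat ∧ letter.toNat ≤ 'z'.toNat then true else sm
    if cap' && sm' then [("capital", cap'), ("small", sm'), ("number", num)]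
    else pvLoopA rest cap' sm' num

def check_upper_lower (username : String) : List (String × Bool) :=
  let letters := username.toList
  -- letters[-1].isnumeric(): on the ASCII domain isnumeric = isdigit (exact there);
  -- none = IndexError on the empty string, excluded by Pre_ (value [] unreachable under Pre_).
  match PySem.List.pyGet? letters (-1) with
  | none => []
  | some last => pvLoopA letters false false (PySem.Chars.isdigit last)

-- ===== PORT B =====
def check_upper_lower_alt (username : String) : List (String × Bool) :=
  match PySem.List.pyGet? username.toList (-1) with
  | none => []  -- IndexError, excluded by Pre_
  | some last =>
    let number := PySem.Chars.isdigit last  -- isnumeric = isdigit on the ASCII domain (exact there)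
    let chars : PySem.Set Char := PySem.Set.ofList username.toList
    -- chr(c) for 65 ≤ c ≤ 122: Char.ofNat c.toNat is exact on that range (hand port of chr)
    let capital := (PySem.List.pyRange 65 91 1).any (fun c => PySem.Set.contains chars (Char.ofNat c.toNat))
    let small := (PySem.List.pyRange 97 123 1).any (fun c => PySem.Set.contains chars (Char.ofNat c.toNat))
    [("capital", capital), ("small", small), ("number", number)]

-- ===== PRECONDITION & SPEC =====
-- Pre_ excludes only the empty string, on which A raises IndexError at letters[-1].
def Pre_check_upper_lower (username : String) : Prop := username ≠ ""
instance (username : String) : Decidable (Pre_check_upper_lower username) := by unfold Pre_check_upper_lower; infer_instance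
def pvWitness_check_upper_lower : String := "aB1"

def Spec_check_upper_lower (username : String) (out : List (String × Bool)) : Prop := out = check_upper_lower_alt username
instance (username : String) (out : List (String × Bool)) : Decidable (Spec_check_upper_lower username out) := by unfold Spec_check_upper_lower; infer_instance

-- ===== CLAIM =====
def Claim_equal_check_upper_lower : Prop := ∀ (username : String), Dom_check_upper_lower username → Pre_check_upper_lower username → Spec_check_upper_lower username (check_upper_lower username)

-- ===== LEMMAS AND PROOFS =====

-- chr is exact below the surrogate range: (Char.ofNat m).toNat = m for m < 0xD800.
lemma pvToNat_ofNat (m : Nat) (h : m < 55296) : (Char.ofNat m).toNat = m := by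
  unfold Char.ofNat
  rw [dif_pos (Or.inl h)]
  simp [Char.ofNatAux, Char.toNat]

-- A's flag over the letters equals B's probe of the alphabet against the character set.
lemma pvAnyFlip (l : List Char) (a b : Int) (ha : 0 ≤ a) (hb : b ≤ 55296) :
    (PySem.List.pyRange a b 1).any (fun c => PySem.Set.contains (PySem.Set.ofList l) (Char.ofNat c.toNat))
      = l.any (fun c => decide (a ≤ (c.toNat : Int) ∧ (c.toNat : Int) < b)) := by
  rw [Bool.eq_iff_iff]
  simp only [List.any_eq_true, PySem.Set.contains_iff, PySem.Set.mem_ofList,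
    PySem.List.mem_pyRange_one, decide_eq_true_eq]
  constructor
  · rintro ⟨n, ⟨hn1, hn2⟩, hmem⟩
    refine ⟨Char.ofNat n.toNat, hmem, ?_, ?_⟩ <;>
    · rw [pvToNat_ofNat n.toNat (by omega)]; omega
  · rintro ⟨c, hc, h1, h2⟩
    refine ⟨(c.toNat : Int), ⟨h1, h2⟩, ?_⟩
    simpa [Char.ofNat_toNat] using hc

lemma pvIfFlag {P Q : Prop} [Decidable P] [Decidable Q] (h : P ↔ Q) (b : Bool) :
    (if P then true else b) = (b || decide Q) := by
  by_cases hp : P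
  · simp [hp, h.mp hp]
  · have hq : ¬Q := fun q => hp (h.mpr q)
    simp [hp, hq]

lemma pvLoopA_eq (l : List Char) : ∀ cap sm num, pvLoopA l cap sm num =
    [("capital", cap || l.any (fun c => decide ((65:Int) ≤ (c.toNat : Int) ∧ (c.toNat : Int) < 91))),
     ("small",   sm  || l.any (fun c => decide ((97:Int) ≤ (c.toNat : Int) ∧ (c.toNat : Int) < 123))),
     ("number",  num)] := by
  induction l with
  | nil => intro cap sm num; simp [pvLoopA]
  | cons c rest ih =>
    intro cap sm num
    have e1 : 'A'.toNat = 65 := rfl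
    have e2 : 'Z'.toNat = 90 := rfl
    have e3 : 'a'.toNat = 97 := rfl
    have e4 : 'z'.toNat = 122 := rfl
    have hA : ('A'.toNat ≤ c.toNat ∧ c.toNat ≤ 'Z'.toNat) ↔ ((65:Int) ≤ (c.toNat : Int) ∧ (c.toNat : Int) < 91) := by
      constructor <;> (intro h; constructor <;> omega)
    have ha : ('a'.toNat ≤ c.toNat ∧ c.toNat ≤ 'z'.toNat) ↔ ((97:Int) ≤ (c.toNat : Int) ∧ (c.toNat : Int) < 123) := by
      constructor <;> (intro h; constructor <;> omega)
    simp only [pvLoopA, pvIfFlag hA, pvIfFlag ha, List.any_cons]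
    split
    · rename_i h
      rw [Bool.and_eq_true] at h
      simp only [← Bool.or_assoc, h.1, h.2, Bool.true_or]
    · simp [ih, Bool.or_assoc]

-- ===== VERDICT =====
theorem check_upper_lower_spec : Claim_equal_check_upper_lower := by
  intro username _ _
  unfold Spec_check_upper_lower check_upper_lower check_upper_lower_alt
  cases h : PySem.List.pyGet? username.toList (-1) with
  | none => simp [h]
  | some last =>
    simp only [h, pvLoopA_eq, pvAnyFlip _ 65 91 (by norm_num) (by norm_num),
      pvAnyFlip _ 97 123 (by norm_num) (by norm_num), Bool.false_or]
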